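-- pv_equiv track=rewrite | github.com/Lucas-Guimaraes/Reddit-Daily-Programmer | Easy Problems/101-110/101easy.py | non_repeating_years
-- ===== SOURCE A (Python) =====
-- def non_repeating_years(year1, year2):
--     temp_year = year1
--     nrp_lst = []
--     #Temp Year is used to iterate over the current year
--     while temp_year <= year2:
--         str_year = str(temp_year)
--         #Checks if the len of unique digits is the same as regular digits
--         if len(set(str_year)) == len(str_year):
--             nrp_lst.append(temp_year)
--         temp_year += 1
--
--     return nrp_lst
-- ===== SOURCE B (Python) =====
-- def non_repeating_years(year1, year2):
--     def gen(a, b):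
--         # ascending list of nonnegative integers in [a, b] whose decimal digits are all distinct,
--         # built by most-significant-first digit DFS with interval pruning
--         def dfs(v, used, r):
--             lo_c = v * 10 ** r
--             hi_c = lo_c + 10 ** r - 1
--             if lo_c > b or hi_c < a:
--                 return []
--             if r == 0:
--                 return [v]
--             return [x for d in range(10) if not used & (1 << d)
--                       for x in dfs(v * 10 + d, used | (1 << d), r - 1)]
--         zero = [0] if a <= 0 <= b else []
--         return zero + [x for L in range(1, 11)
--                          for d in range(1, 10)
--                          for x in dfs(d, 1 << d, L - 1)]
--     neg = [-m for m in reversed(gen(max(1, -year2), -year1))]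
--     return neg + gen(max(0, year1), year2)
-- ===== Notes on version B (the rewrite author's own statement) =====
-- stated objective: faster
-- what changed: Instead of scanning every year and testing str/set per year, B generates the distinct-digit numbers directly by a most-significant-first digit DFS (unused-digit mask) with interval pruning against [year1,year2], emitting them in ascending order by construction (negatives via the mirrored nonnegative generator).
import Mathlib
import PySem

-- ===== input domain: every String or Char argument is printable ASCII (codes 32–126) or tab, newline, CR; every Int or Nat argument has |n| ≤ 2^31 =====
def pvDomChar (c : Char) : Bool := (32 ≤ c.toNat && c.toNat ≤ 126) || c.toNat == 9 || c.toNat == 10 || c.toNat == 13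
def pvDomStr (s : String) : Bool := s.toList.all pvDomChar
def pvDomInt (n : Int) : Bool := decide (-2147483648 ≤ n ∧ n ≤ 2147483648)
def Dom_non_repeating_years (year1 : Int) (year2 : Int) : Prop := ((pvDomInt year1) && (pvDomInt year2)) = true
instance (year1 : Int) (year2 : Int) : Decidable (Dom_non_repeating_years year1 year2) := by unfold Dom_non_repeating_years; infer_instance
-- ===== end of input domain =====

-- B generates the distinct-digit numbers of the range directly by a digit DFS with
-- interval pruning (ascending by construction) instead of testing every year
-- (objective: faster, output-sensitive instead of linear in the range width).

-- ===== PORT A =====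
-- while temp_year <= year2: str_year = str(temp_year); if len(set(str_year)) == len(str_year): append; temp_year += 1
def nryLoop (year2 : Int) (temp_year : Int) (nrp_lst : List Int) : List Int :=
  if _h : temp_year ≤ year2 then
    let str_year := PySem.Int.toStr temp_year
    nryLoop year2 (temp_year + 1)
      (if PySem.Set.len (PySem.Set.ofList str_year.toList) = PySem.Str.len str_year
       then nrp_lst ++ [temp_year] else nrp_lst)
  else nrp_lst
termination_by (year2 + 1 - temp_year).toNat
decreasing_by omega

def non_repeating_years (year1 : Int) (year2 : Int) : List Int :=
  nryLoop year2 year1 []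

-- ===== PORT B =====
-- dfs(v, used, r) of Source B: prune when the completion interval [v*10^r, v*10^r+10^r-1]
-- misses [a, b]; at r == 0 emit v; else recurse over the unused digits in ascending order
def pvDfs (a b : Int) (v : Int) (used : Nat) (r : Nat) : List Int :=
  if v * 10 ^ r > b || v * 10 ^ r + 10 ^ r - 1 < a then []
  else match r with
    | 0 => [v]
    | r' + 1 =>
      ((List.range 10).filter (fun d => !used.testBit d)).flatMap
        (fun (d : Nat) => pvDfs a b (v * 10 + (d : Int)) (used ||| ((1 : Nat) <<< d)) r')

-- gen(a, b) of Source B: optional 0, then lengths L = 1..10, leading digits d = 1..9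
def pvGen (a b : Int) : List Int :=
  (if a ≤ 0 ∧ 0 ≤ b then [(0 : Int)] else []) ++
  (List.range' 1 10).flatMap (fun L =>
    (List.range' 1 9).flatMap (fun (d : Nat) => pvDfs a b (d : Int) ((1 : Nat) <<< d) (L - 1)))

-- neg = [-m for m in reversed(gen(max(1, -year2), -year1))]; return neg + gen(max(0, year1), year2)
def non_repeating_years_alt (year1 : Int) (year2 : Int) : List Int :=
  ((pvGen (max 1 (-year2)) (-year1)).reverse.map (fun m => -m)) ++ pvGen (max 0 year1) year2

-- ===== PRECONDITION & SPEC =====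
def Spec_non_repeating_years (year1 : Int) (year2 : Int) (out : List Int) : Prop := out = non_repeating_years_alt year1 year2
instance (year1 : Int) (year2 : Int) (out : List Int) : Decidable (Spec_non_repeating_years year1 year2 out) := by unfold Spec_non_repeating_years; infer_instance

-- ===== CLAIM (what is proved, stated in full; the proofs are below) =====
def Claim_equal_non_repeating_years : Prop := ∀ (year1 : Int) (year2 : Int), Dom_non_repeating_years year1 year2 → Spec_non_repeating_years year1 year2 (non_repeating_years year1 year2)

-- ===== LEMMAS AND PROOFS =====

-- the list of decimal digits of n, least significant first (proof-side description)
def pvDigs (n : Nat) : List Nat :=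
  if _h : n / 10 = 0 then [n % 10] else n % 10 :: pvDigs (n / 10)
termination_by n
decreasing_by omega

lemma pvDigs_lt_ten (n : Nat) : ∀ d ∈ pvDigs n, d < 10 := by
  fun_induction pvDigs with
  | case1 n h => intro d hd; simp at hd; omega
  | case2 n h ih =>
    intro d hd
    rcases List.mem_cons.mp hd with h1 | h2
    · omega
    · exact ih d h2

lemma toDigitsCore_eq (f : Nat) : ∀ (n : Nat) (ds : List Char), n < f →
    Nat.toDigitsCore 10 f n ds = ((pvDigs n).map Nat.digitChar).reverse ++ ds := by
  induction f with
  | zero => intro n ds h; omega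
  | succ f ih =>
    intro n ds h
    rw [Nat.toDigitsCore, pvDigs]
    by_cases h10 : n / 10 = 0 <;> simp only [h10, if_true, if_false, dif_pos, dif_neg, not_false_iff]
    · simp
    · rw [ih (n / 10) _ (by omega)]
      simp

lemma toDigits_eq (n : Nat) : Nat.toDigits 10 n = ((pvDigs n).map Nat.digitChar).reverse := by
  rw [Nat.toDigits, toDigitsCore_eq (n + 1) n [] (by omega)]
  simp

lemma digitChar_inj : ∀ a < 10, ∀ b < 10, Nat.digitChar a = Nat.digitChar b → a = b := by decide

lemma digitChar_ne_dash : ∀ a < 10, Nat.digitChar a ≠ '-' := by decide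

lemma nodup_map_digitChar (l : List Nat) (h : ∀ d ∈ l, d < 10) :
    (l.map Nat.digitChar).Nodup ↔ l.Nodup := by
  induction l with
  | nil => simp
  | cons a t ih =>
    simp only [List.map_cons, List.nodup_cons, List.mem_map]
    constructor
    · rintro ⟨h1, h2⟩
      refine ⟨fun ha => h1 ⟨a, ha, rfl⟩, (ih (fun d hd => h d (List.mem_cons_of_mem _ hd))).mp h2⟩
    · rintro ⟨h1, h2⟩
      refine ⟨?_, (ih (fun d hd => h d (List.mem_cons_of_mem _ hd))).mpr h2⟩
      rintro ⟨b, hb, hba⟩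
      exact h1 (digitChar_inj b (h b (List.mem_cons_of_mem _ hb)) a (h a List.mem_cons_self) hba ▸ hb)

-- len(set(l)) == len(l) is exactly Nodup l
lemma ofList_length_eq_iff (l : List Char) :
    (PySem.Set.ofList l).length = l.length ↔ l.Nodup := by
  have hperm : (PySem.Set.ofList l).Perm l.dedup := by
    rw [List.perm_ext_iff_of_nodup (PySem.Set.nodup_ofList l) (List.nodup_dedup l)]
    intro a
    rw [← PySem.List.dedup_eq_ofList, PySem.List.mem_dedup, List.mem_dedup]
  rw [hperm.length_eq]
  constructor
  · intro h
    exact List.dedup_eq_self.mp ((List.dedup_sublist l).eq_of_length h)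
  · intro h
    rw [List.dedup_eq_self.mpr h]

-- A's per-year test, characterised by the digit list
lemma condA_iff (t : Int) :
    (PySem.Set.len (PySem.Set.ofList (PySem.Int.toStr t).toList) = PySem.Str.len (PySem.Int.toStr t))
      ↔ (pvDigs t.natAbs).Nodup := by
  rw [PySem.Set.len, PySem.Str.len, Int.natCast_inj, PySem.Int.toList_toStr,
    ofList_length_eq_iff, PySem.Int.toChars]
  have key : ∀ m : Nat, (Nat.toDigits 10 m).Nodup ↔ (pvDigs m).Nodup := by
    intro m
    rw [toDigits_eq, List.nodup_reverse, nodup_map_digitChar _ (pvDigs_lt_ten m)]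
  by_cases ht : t < 0
  · simp only [ht, if_pos]
    rw [List.nodup_cons]
    have hdash : '-' ∉ Nat.toDigits 10 t.natAbs := by
      rw [toDigits_eq]
      intro hmem
      rw [List.mem_reverse, List.mem_map] at hmem
      obtain ⟨d, hd, hdc⟩ := hmem
      exact digitChar_ne_dash d (pvDigs_lt_ten _ d hd) hdc
    rw [key t.natAbs]
    tauto
  · simp only [ht, if_neg, not_false_iff]
    have : t.toNat = t.natAbs := by omega
    rw [this, key]

-- A's loop is the filter of the range
lemma nryLoop_eq (year2 temp : Int) (acc : List Int) :
    nryLoop year2 temp acc = acc ++ (PySem.List.pyRange temp (year2 + 1) 1).filter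
      (fun t => decide ((pvDigs t.natAbs).Nodup)) := by
  fun_induction nryLoop with
  | case1 t acc hle s ih =>
    rw [show s = PySem.Int.toStr t from rfl] at ih ⊢
    rw [PySem.List.pyRange_one_cons (by omega : t < year2 + 1), List.filter_cons]
    by_cases hcond : PySem.Set.len (PySem.Set.ofList (PySem.Int.toStr t).toList) = PySem.Str.len (PySem.Int.toStr t)
    · have hd : (pvDigs t.natAbs).Nodup := (condA_iff t).mp hcond
      simp only [hcond, if_pos, dite_eq_ite] at ih ⊢
      rw [ih]
      simp [hd, List.append_assoc]
    · have hd : ¬ (pvDigs t.natAbs).Nodup := fun h => hcond ((condA_iff t).mpr h)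
      simp only [hcond, dite_eq_ite, ite_false] at ih ⊢
      rw [ih]
      simp [hd]
  | case2 t acc hle =>
    rw [PySem.List.pyRange_one_eq_nil (by omega)]
    simp

-- ---- digit suffix lists (proof-side description of the DFS) ----

-- the r least-significant digits of t (LSB first)
def pvSuff : Nat → Nat → List Nat
  | _, 0 => []
  | t, r + 1 => t % 10 :: pvSuff (t / 10) r

lemma pvSuff_append (d : Nat) (hd : d < 10) :
    ∀ (r t : Nat), t < 10 ^ r → pvSuff (d * 10 ^ r + t) (r + 1) = pvSuff t r ++ [d] := by
  intro r
  induction r with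
  | zero =>
    intro t ht
    interval_cases t
    simp [pvSuff, Nat.mod_eq_of_lt hd]
  | succ r ih =>
    intro t ht
    have hmod : (d * 10 ^ (r + 1) + t) % 10 = t % 10 := by
      conv_lhs => rw [pow_succ, ← mul_assoc, mul_comm (d * 10 ^ r) 10, Nat.mul_add_mod]
    have hdiv : (d * 10 ^ (r + 1) + t) / 10 = d * 10 ^ r + t / 10 := by
      rw [pow_succ, ← mul_assoc, mul_comm (d * 10 ^ r) 10, Nat.mul_add_div (by norm_num)]
    have ht' : t / 10 < 10 ^ r := Nat.div_lt_of_lt_mul (by rw [mul_comm, ← pow_succ]; exact ht)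
    show (d * 10 ^ (r + 1) + t) % 10 :: pvSuff ((d * 10 ^ (r + 1) + t) / 10) (r + 1)
        = (t % 10 :: pvSuff (t / 10) r) ++ [d]
    rw [hmod, hdiv, ih _ ht']
    simp

-- pvDigs of an (L+1)-digit number is its suffix list
lemma pvDigs_eq_pvSuff : ∀ (L n : Nat), 10 ^ L ≤ n → n < 10 ^ (L + 1) → pvDigs n = pvSuff n (L + 1) := by
  intro L
  induction L with
  | zero =>
    intro n h1 h2
    have h2' : n < 10 := by simpa using h2
    have hz : n / 10 = 0 := Nat.div_eq_of_lt h2'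
    rw [pvDigs]
    simp [hz, pvSuff]
  | succ L ih =>
    intro n h1 h2
    have h10 : n / 10 ≠ 0 := by
      have h10n : (10 : Nat) ≤ 10 ^ (L + 1) := by
        calc (10 : Nat) = 10 ^ 1 := by norm_num
          _ ≤ 10 ^ (L + 1) := Nat.pow_le_pow_right (by norm_num) (by omega)
      have : 10 ≤ n := le_trans h10n h1
      omega
    rw [pvDigs]
    simp only [h10, dif_neg, not_false_iff]
    show n % 10 :: pvDigs (n / 10) = n % 10 :: pvSuff (n / 10) (L + 1)
    rw [ih (n / 10)]
    · exact Nat.le_div_iff_mul_le (by norm_num) |>.mpr (by rw [← pow_succ]; exact h1)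
    · exact Nat.div_lt_of_lt_mul (by rw [mul_comm, ← pow_succ]; exact h2)

-- membership in the DFS output
lemma mem_pvDfs (a b : Int) : ∀ (r : Nat) (v : Int) (used : Nat) (x : Int),
    x ∈ pvDfs a b v used r ↔
      ∃ t : Nat, t < 10 ^ r ∧ x = v * 10 ^ r + (t : Int) ∧ a ≤ x ∧ x ≤ b ∧
        (pvSuff t r).Nodup ∧ ∀ d ∈ pvSuff t r, used.testBit d = false := by
  intro r
  induction r with
  | zero =>
    intro v used x
    rw [pvDfs]
    simp only [pow_zero, mul_one]
    by_cases hp : (decide (v > b) || decide (v + 1 - 1 < a)) = true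
    · rw [if_pos hp]
      simp only [List.not_mem_nil, false_iff]
      rintro ⟨t, ht, hx, hax, hxb, -, -⟩
      have ht0 : t = 0 := by omega
      subst ht0
      simp only [Bool.or_eq_true, decide_eq_true_eq] at hp
      simp only [Nat.cast_zero] at hx
      omega
    · rw [if_neg hp]
      simp only [Bool.or_eq_true, decide_eq_true_eq, not_or, not_lt] at hp
      simp only [List.mem_singleton]
      constructor
      · rintro rfl
        exact ⟨0, by norm_num, by simp, by omega, by omega, by simp [pvSuff], by simp [pvSuff]⟩
      · rintro ⟨t, ht, hx, -, -, -, -⟩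
        have ht0 : t = 0 := by omega
        subst ht0
        simpa using hx
  | succ r ih =>
    intro v used x
    rw [pvDfs]
    by_cases hp : (decide (v * 10 ^ (r + 1) > b) || decide (v * 10 ^ (r + 1) + 10 ^ (r + 1) - 1 < a)) = true
    · rw [if_pos hp]
      simp only [Bool.or_eq_true, decide_eq_true_eq] at hp
      simp only [List.not_mem_nil, false_iff]
      rintro ⟨t, ht, hx, hax, hxb, -, -⟩
      have htI : (t : Int) < (10 : Int) ^ (r + 1) := by exact_mod_cast ht
      have ht0 : (0 : Int) ≤ (t : Int) := Int.natCast_nonneg t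
      generalize hP : (10 : Int) ^ (r + 1) = P at hp hx htI
      generalize hQ : v * P = Q at hp hx
      rcases hp with h | h <;> omega
    · rw [if_neg hp]
      simp only [Bool.or_eq_true, decide_eq_true_eq, not_or, not_lt] at hp
      simp only [List.mem_flatMap, List.mem_filter, List.mem_range, Bool.not_eq_eq_eq_not,
        Bool.not_true]
      constructor
      · rintro ⟨d, ⟨hd10, hdbit⟩, hx⟩
        rw [ih] at hx
        obtain ⟨t', ht', hxeq, hax, hxb, hnd, havoid⟩ := hx
        have hsuff : pvSuff (d * 10 ^ r + t') (r + 1) = pvSuff t' r ++ [d] :=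
          pvSuff_append d hd10 r t' ht'
        have hused : ∀ e ∈ pvSuff t' r, used.testBit e = false ∧ e ≠ d := by
          intro e he
          have h1 := havoid e he
          rw [Nat.testBit_or, Bool.or_eq_false_iff, Nat.one_shiftLeft, Nat.testBit_two_pow] at h1
          exact ⟨h1.1, fun hed => by simp [hed] at h1⟩
        refine ⟨d * 10 ^ r + t', ?_, ?_, hax, hxb, ?_, ?_⟩
        · have h1 : d * 10 ^ r ≤ 9 * 10 ^ r := Nat.mul_le_mul_right _ (by omega)
          have h2 : (10 : Nat) ^ (r + 1) = 10 * 10 ^ r := by ring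
          omega
        · rw [hxeq]; push_cast; ring
        · rw [hsuff, List.nodup_append]
          refine ⟨hnd, List.nodup_singleton d, ?_⟩
          intro e he f hf
          rw [List.mem_singleton] at hf
          subst hf
          exact (hused e he).2
        · rw [hsuff]
          intro e he
          rcases List.mem_append.mp he with h1 | h1
          · exact (hused e h1).1
          · rw [List.mem_singleton] at h1
            subst h1
            simpa using hdbit
      · rintro ⟨t, ht, hxeq, hax, hxb, hnd, havoid⟩
        have hpos : (0 : Nat) < 10 ^ r := by positivity
        set d := t / 10 ^ r with hd
        set t' := t % 10 ^ r with ht'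
        have hd10 : d < 10 := by
          rw [hd, Nat.div_lt_iff_lt_mul hpos]
          calc t < 10 ^ (r + 1) := ht
            _ = 10 * 10 ^ r := by ring
        have hts : t = d * 10 ^ r + t' := by
          rw [hd, ht', mul_comm]
          exact (Nat.div_add_mod t (10 ^ r)).symm
        have ht'lt : t' < 10 ^ r := Nat.mod_lt t hpos
        have hsuff : pvSuff t (r + 1) = pvSuff t' r ++ [d] := by
          rw [hts]; exact pvSuff_append d hd10 r t' ht'lt
        rw [hsuff] at hnd havoid
        rw [List.nodup_append] at hnd
        refine ⟨d, ⟨hd10, ?_⟩, ?_⟩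
        · have := havoid d (by simp)
          simp [this]
        · rw [ih]
          refine ⟨t', ht'lt, ?_, hax, hxb, hnd.1, ?_⟩
          · rw [hxeq, hts]; push_cast; ring
          · intro e he
            rw [Nat.testBit_or, Bool.or_eq_false_iff, Nat.one_shiftLeft, Nat.testBit_two_pow]
            refine ⟨havoid e (List.mem_append_left _ he), ?_⟩
            have hne : e ≠ d := hnd.2.2 e he d (by simp)
            exact decide_eq_false (fun h => hne h.symm)

-- every DFS value lies in the completion interval of its prefix
lemma pvDfs_bound (a b v : Int) (used : Nat) (r : Nat) :
    ∀ x ∈ pvDfs a b v used r, v * 10 ^ r ≤ x ∧ x < (v + 1) * 10 ^ r := by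
  intro x hx
  rw [mem_pvDfs] at hx
  obtain ⟨t, ht, rfl, -, -, -, -⟩ := hx
  have htI : (t : Int) < (10 : Int) ^ r := by exact_mod_cast ht
  have h0 : (0 : Int) ≤ (t : Int) := Int.natCast_nonneg t
  refine ⟨le_add_of_nonneg_right h0, ?_⟩
  calc v * 10 ^ r + (t : Int) < v * 10 ^ r + 10 ^ r := by omega
    _ = (v + 1) * 10 ^ r := by ring

-- the DFS output is strictly increasing
lemma pairwise_pvDfs (a b : Int) : ∀ (r : Nat) (v : Int) (used : Nat),
    (pvDfs a b v used r).Pairwise (· < ·) := by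
  intro r
  induction r with
  | zero =>
    intro v used
    rw [pvDfs]
    split
    · exact List.Pairwise.nil
    · exact List.pairwise_singleton _ _
  | succ r ih =>
    intro v used
    rw [pvDfs]
    split
    · exact List.Pairwise.nil
    · rw [List.pairwise_flatMap]
      refine ⟨fun d _ => ih _ _, ?_⟩
      apply List.Pairwise.filter
      apply List.pairwise_lt_range.imp
      intro d1 d2 hlt x hx y hy
      have hx' := pvDfs_bound a b _ _ r x hx
      have hy' := pvDfs_bound a b _ _ r y hy
      have hP : (0 : Int) ≤ (10 : Int) ^ r := by positivity
      have hd : (d1 : Int) + 1 ≤ (d2 : Int) := by exact_mod_cast hlt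
      calc x < (v * 10 + (d1 : Int) + 1) * 10 ^ r := hx'.2
        _ ≤ (v * 10 + (d2 : Int)) * 10 ^ r := mul_le_mul_of_nonneg_right (by omega) hP
        _ ≤ y := hy'.1

-- membership in gen(a, b)
lemma mem_pvGen (a b x : Int) (hb : b < 10 ^ 10) :
    x ∈ pvGen a b ↔ a ≤ x ∧ x ≤ b ∧ 0 ≤ x ∧ (pvDigs x.natAbs).Nodup := by
  have hdigs0 : pvDigs 0 = [0] := by rw [pvDigs]; norm_num
  rw [pvGen, List.mem_append, List.mem_flatMap]
  constructor
  · rintro (hz | hmain)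
    · have hz' : (a ≤ 0 ∧ 0 ≤ b) ∧ x = 0 := by
        by_cases h : a ≤ 0 ∧ 0 ≤ b
        · rw [if_pos h, List.mem_singleton] at hz
          exact ⟨h, hz⟩
        · rw [if_neg h] at hz
          simp at hz
      obtain ⟨⟨ha0, hb0⟩, rfl⟩ := hz'
      simp [hdigs0, ha0, hb0]
    · obtain ⟨L, hL, hx⟩ := hmain
      rw [List.mem_flatMap] at hx
      obtain ⟨d, hd, hx⟩ := hx
      rw [List.mem_range'_1] at hL hd
      have hL1 : 1 ≤ L ∧ L ≤ 10 := by omega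
      have hd1 : 1 ≤ d ∧ d < 10 := by omega
      rw [mem_pvDfs] at hx
      obtain ⟨t, ht, hxeq, hax, hxb, hnd, havoid⟩ := hx
      have hP0 : (0 : Int) < (10 : Int) ^ (L - 1) := by positivity
      have h0t : (0 : Int) ≤ (t : Int) := Int.natCast_nonneg t
      have hxpos : (0 : Int) ≤ x := by
        have h1 : (1 : Int) * 10 ^ (L - 1) ≤ (d : Int) * 10 ^ (L - 1) :=
          mul_le_mul_of_nonneg_right (by exact_mod_cast hd1.1) (le_of_lt hP0)
        rw [hxeq]; omega
      have hm : x.natAbs = d * 10 ^ (L - 1) + t := by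
        have hx' : x = ((d * 10 ^ (L - 1) + t : Nat) : Int) := by rw [hxeq]; push_cast; ring
        rw [hx', Int.natAbs_natCast]
      have hlow : 10 ^ (L - 1) ≤ x.natAbs := by
        rw [hm]
        have h1 : 1 * 10 ^ (L - 1) ≤ d * 10 ^ (L - 1) := Nat.mul_le_mul_right _ hd1.1
        omega
      have hhigh : x.natAbs < 10 ^ L := by
        rw [hm]
        have h9 : d * 10 ^ (L - 1) ≤ 9 * 10 ^ (L - 1) := Nat.mul_le_mul_right _ (by omega)
        have hsplit : (10 : Nat) ^ L = 10 ^ (L - 1) * 10 := by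
          rw [← pow_succ, Nat.sub_add_cancel hL1.1]
        omega
      have hdig : pvDigs x.natAbs = pvSuff t (L - 1) ++ [d] := by
        have h1 := pvDigs_eq_pvSuff (L - 1) x.natAbs hlow
          (by rw [Nat.sub_add_cancel hL1.1]; exact hhigh)
        rw [h1, hm]
        exact pvSuff_append d hd1.2 (L - 1) t ht
      refine ⟨hax, hxb, hxpos, ?_⟩
      rw [hdig, List.nodup_append]
      refine ⟨hnd, List.nodup_singleton _, ?_⟩
      intro e he f hf
      rw [List.mem_singleton] at hf
      subst hf
      have := havoid e he
      rw [Nat.one_shiftLeft, Nat.testBit_two_pow] at this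
      intro hed
      simp [hed] at this
  · rintro ⟨hax, hxb, hx0, hnd⟩
    by_cases hx : x = 0
    · subst hx
      left
      rw [if_pos (⟨hax, hxb⟩ : a ≤ 0 ∧ 0 ≤ b)]
      simp
    · right
      have hx1 : 1 ≤ x := by omega
      have hxn : x = (x.natAbs : Int) := (Int.natAbs_of_nonneg hx0).symm
      set n := x.natAbs with hn
      have hn1 : 1 ≤ n := by omega
      have hb' : b < 10000000000 := by norm_num at hb; exact hb
      have hnlt : n < 10 ^ 10 := by
        have h1 : (n : Int) < 10000000000 := by omega
        norm_num
        exact_mod_cast h1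
      set L0 := Nat.log 10 n with hL0
      have hlow : 10 ^ L0 ≤ n := Nat.pow_log_le_self 10 (by omega)
      have hhigh : n < 10 ^ (L0 + 1) := Nat.lt_pow_succ_log_self (by norm_num) n
      have hL0lt : L0 < 10 := by
        rcases Nat.lt_or_ge L0 10 with h | h
        · exact h
        · exfalso
          have h1 : (10 : Nat) ^ 10 ≤ 10 ^ L0 := Nat.pow_le_pow_right (by norm_num) h
          omega
      have hpos : 0 < (10 : Nat) ^ L0 := by positivity
      set d := n / 10 ^ L0 with hdd
      set t := n % 10 ^ L0 with htt
      have hd1 : 1 ≤ d := (Nat.one_le_div_iff hpos).mpr hlow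
      have hd9 : d < 10 := by
        rw [hdd, Nat.div_lt_iff_lt_mul hpos]
        have hps : (10 : Nat) ^ (L0 + 1) = 10 ^ L0 * 10 := pow_succ 10 L0
        omega
      have hts : n = d * 10 ^ L0 + t := by
        rw [hdd, htt, mul_comm]
        exact (Nat.div_add_mod n (10 ^ L0)).symm
      have htlt : t < 10 ^ L0 := Nat.mod_lt _ hpos
      have hdig : pvDigs n = pvSuff t L0 ++ [d] := by
        rw [pvDigs_eq_pvSuff L0 n hlow hhigh, hts]
        exact pvSuff_append d hd9 L0 t htlt
      rw [hdig, List.nodup_append] at hnd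
      refine ⟨L0 + 1, ?_, ?_⟩
      · rw [List.mem_range'_1]
        omega
      · rw [List.mem_flatMap]
        refine ⟨d, ?_, ?_⟩
        · rw [List.mem_range'_1]
          omega
        · rw [mem_pvDfs]
          simp only [Nat.add_sub_cancel]
          refine ⟨t, htlt, ?_, hax, hxb, hnd.1, ?_⟩
          · rw [hxn, hts]; push_cast; ring
          · intro e he
            rw [Nat.one_shiftLeft, Nat.testBit_two_pow]
            exact decide_eq_false (fun h => (hnd.2.2 e he d (by simp)) h.symm)

-- every element of one length-block of gen lies in that block's decade
lemma pvGen_inner_bound (a b : Int) (L : Nat) (hL : 1 ≤ L) :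
    ∀ x ∈ (List.range' 1 9).flatMap
        (fun (d : Nat) => pvDfs a b (d : Int) ((1 : Nat) <<< d) (L - 1)),
      (10 : Int) ^ (L - 1) ≤ x ∧ x < 10 ^ L := by
  intro x hx
  rw [List.mem_flatMap] at hx
  obtain ⟨d, hd, hx⟩ := hx
  rw [List.mem_range'_1] at hd
  have hd' : 1 ≤ d ∧ d < 10 := by omega
  have hbnd := pvDfs_bound a b (d : Int) _ (L - 1) x hx
  have hP : (0 : Int) ≤ (10 : Int) ^ (L - 1) := by positivity
  have hLL : 10 * (10 : Int) ^ (L - 1) = 10 ^ L := by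
    rw [← pow_succ', Nat.sub_add_cancel hL]
  constructor
  · calc (10 : Int) ^ (L - 1) = 1 * 10 ^ (L - 1) := (one_mul _).symm
      _ ≤ (d : Int) * 10 ^ (L - 1) :=
        mul_le_mul_of_nonneg_right (by exact_mod_cast hd'.1) hP
      _ ≤ x := hbnd.1
  · calc x < ((d : Int) + 1) * 10 ^ (L - 1) := hbnd.2
      _ ≤ 10 * 10 ^ (L - 1) := by
        have : (d : Int) + 1 ≤ 10 := by exact_mod_cast hd'.2
        exact mul_le_mul_of_nonneg_right this hP
      _ = 10 ^ L := hLL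

-- gen(a, b) is strictly increasing
lemma pairwise_pvGen (a b : Int) : (pvGen a b).Pairwise (· < ·) := by
  rw [pvGen, List.pairwise_append]
  refine ⟨by split <;> simp, ?_, ?_⟩
  · rw [List.pairwise_flatMap]
    constructor
    · intro L hL
      rw [List.pairwise_flatMap]
      refine ⟨fun d _ => pairwise_pvDfs a b _ _ _, ?_⟩
      apply (List.pairwise_lt_range' (s := 1) (n := 9)).imp
      intro d1 d2 hlt x hx y hy
      have hx' := pvDfs_bound a b _ _ (L - 1) x hx
      have hy' := pvDfs_bound a b _ _ (L - 1) y hy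
      have hP : (0 : Int) ≤ (10 : Int) ^ (L - 1) := by positivity
      have hd : (d1 : Int) + 1 ≤ (d2 : Int) := by exact_mod_cast hlt
      calc x < ((d1 : Int) + 1) * 10 ^ (L - 1) := hx'.2
        _ ≤ (d2 : Int) * 10 ^ (L - 1) := mul_le_mul_of_nonneg_right hd hP
        _ ≤ y := hy'.1
    · apply (List.pairwise_lt_range' (s := 1) (n := 10)).imp_of_mem
      intro L1 L2 hm1 hm2 hlt x hx y hy
      rw [List.mem_range'_1] at hm1 hm2
      have h1 := pvGen_inner_bound a b L1 (by omega) x hx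
      have h2 := pvGen_inner_bound a b L2 (by omega) y hy
      have hmono : (10 : Int) ^ L1 ≤ 10 ^ (L2 - 1) :=
        pow_le_pow_right₀ (by norm_num) (by omega)
      calc x < 10 ^ L1 := h1.2
        _ ≤ 10 ^ (L2 - 1) := hmono
        _ ≤ y := h2.1
  · intro x hx y hy
    have hx0 : x = 0 := by
      revert hx
      split
      · simp only [List.mem_singleton]
        exact fun h => h
      · simp
    subst hx0
    rw [List.mem_flatMap] at hy
    obtain ⟨L, hL, hy⟩ := hy
    rw [List.mem_range'_1] at hL
    have h2 := (pvGen_inner_bound a b L (by omega) y hy).1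
    have hp1 : (1 : Int) ≤ 10 ^ (L - 1) := one_le_pow₀ (by norm_num)
    omega

-- two strictly increasing integer lists with the same members are equal
lemma eq_of_pairwise_lt_of_mem_iff {l1 l2 : List Int}
    (h1 : l1.Pairwise (· < ·)) (h2 : l2.Pairwise (· < ·))
    (h : ∀ x, x ∈ l1 ↔ x ∈ l2) : l1 = l2 := by
  have nd1 : l1.Nodup := h1.nodup
  have nd2 : l2.Nodup := h2.nodup
  have hperm : l1.Perm l2 := (List.perm_ext_iff_of_nodup nd1 nd2).mpr h
  exact hperm.eq_of_pairwise (fun a b _ _ hab hba => absurd hab (asymm hba)) h1 h2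

-- ===== VERDICT (by name: the statement is the Claim_ definition above) =====
theorem non_repeating_years_spec : Claim_equal_non_repeating_years := by
  intro year1 year2 hdom
  have hd : -2147483648 ≤ year1 ∧ year1 ≤ 2147483648 ∧ -2147483648 ≤ year2 ∧ year2 ≤ 2147483648 := by
    simp only [Dom_non_repeating_years, pvDomInt, Bool.and_eq_true, decide_eq_true_iff] at hdom
    exact ⟨hdom.1.1, hdom.1.2, hdom.2.1, hdom.2.2⟩
  unfold Spec_non_repeating_years non_repeating_years non_repeating_years_alt
  rw [nryLoop_eq]
  simp only [List.nil_append]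
  apply eq_of_pairwise_lt_of_mem_iff
  · exact (PySem.List.pairwise_lt_pyRange_one year1 (year2 + 1)).filter _
  · rw [List.pairwise_append]
    refine ⟨?_, pairwise_pvGen _ _, ?_⟩
    · rw [List.pairwise_map, List.pairwise_reverse]
      exact (pairwise_pvGen _ _).imp (by intro x y hxy; omega)
    · intro x hx y hy
      rw [List.mem_map] at hx
      obtain ⟨m, hm, rfl⟩ := hx
      rw [List.mem_reverse] at hm
      have h1 := (mem_pvGen _ _ m (by omega)).mp hm
      have h2 := (mem_pvGen _ _ y (by omega)).mp hy
      omega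
  · intro x
    rw [List.mem_filter, PySem.List.mem_pyRange_one, List.mem_append, List.mem_map,
      decide_eq_true_iff]
    constructor
    · rintro ⟨⟨hx1, hx2⟩, hnd⟩
      by_cases hx : 0 ≤ x
      · exact Or.inr ((mem_pvGen _ _ x (by omega)).mpr ⟨by omega, by omega, hx, hnd⟩)
      · refine Or.inl ⟨-x, ?_, by ring⟩
        rw [List.mem_reverse]
        refine (mem_pvGen _ _ (-x) (by omega)).mpr ⟨by omega, by omega, by omega, ?_⟩
        rwa [Int.natAbs_neg]
    · rintro (⟨m, hm, rfl⟩ | hx)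
      · rw [List.mem_reverse] at hm
        have h := (mem_pvGen _ _ m (by omega)).mp hm
        rw [Int.natAbs_neg]
        refine ⟨⟨by omega, by omega⟩, h.2.2.2⟩
      · have h := (mem_pvGen _ _ x (by omega)).mp hx
        exact ⟨⟨by omega, by omega⟩, h.2.2.2⟩
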